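-- pv_equiv track=rewrite | github.com/pearltran080/Coderbyte | exoh.py | StringChallenge
-- ===== SOURCE A (Python) =====
-- def StringChallenge(strParam):
--   x = 0
--   o = 0
--   for i in strParam:
--     if i == 'x':
--       x += 1
--     else:
--       o += 1
--   if (x != o):
--     return False
--   else:
--     return True
-- ===== SOURCE B (Python) =====
-- def StringChallenge(strParam):
--   # Stack cancellation: each pop pairs one 'x' with one non-'x' character;
--   # the counts are equal exactly when every character is paired off.
--   stack = []
--   for ch in strParam:
--     k = (ch == 'x')
--     if stack and stack[-1] != k:
--       stack.pop()
--     else: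
--       stack.append(k)
--   return not stack
-- ===== Notes on version B (the rewrite author's own statement) =====
-- stated objective: alternative
-- what changed: Replaced the dual-counter comparison loop with a stack-cancellation algorithm: kinds are pushed and opposite kinds cancel by popping, and the answer is whether the stack ends empty.
import Mathlib
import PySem

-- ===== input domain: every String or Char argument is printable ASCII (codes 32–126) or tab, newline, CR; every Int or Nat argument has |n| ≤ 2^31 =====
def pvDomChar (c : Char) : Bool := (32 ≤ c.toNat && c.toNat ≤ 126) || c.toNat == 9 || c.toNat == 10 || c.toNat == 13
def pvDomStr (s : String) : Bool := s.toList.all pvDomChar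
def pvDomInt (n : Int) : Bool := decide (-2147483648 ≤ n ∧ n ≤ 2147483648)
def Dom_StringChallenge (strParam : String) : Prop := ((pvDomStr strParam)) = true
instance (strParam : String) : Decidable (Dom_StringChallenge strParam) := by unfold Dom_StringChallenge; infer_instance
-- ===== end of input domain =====

-- B replaces A's dual-counter comparison loop by a stack-cancellation algorithm
-- (opposite kinds cancel by popping; answer = stack ends empty) — objective: alternative.

-- ===== PORT A =====
-- two counters x, o maintained by a per-character branch, then the x != o test
def StringChallenge (strParam : String) : Bool :=
  let p := strParam.toList.foldl
    (fun (p : Int × Int) i => if i == 'x' then (p.1 + 1, p.2) else (p.1, p.2 + 1))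
    (0, 0)
  if p.1 ≠ p.2 then false else true

-- ===== PORT B =====
-- one step of Source B's loop body; the stack's top (Python's end of list) is the list head
def pvStep (st : List Bool) (c : Char) : List Bool :=
  let k := (c == 'x')
  match st with
  | [] => [k]                               -- stack empty: append
  | t :: r => if t == k then k :: t :: r else r   -- same kind: append; opposite: pop

def StringChallenge_alt (strParam : String) : Bool :=
  (strParam.toList.foldl pvStep []).isEmpty

-- ===== PRECONDITION & SPEC =====
def Spec_StringChallenge (strParam : String) (out : Bool) : Prop := out = StringChallenge_alt strParam
instance (strParam : String) (out : Bool) : Decidable (Spec_StringChallenge strParam out) := by unfold Spec_StringChallenge; infer_instance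

-- ===== CLAIM (what is proved, stated in full; the proofs are below) =====
def Claim_equal_StringChallenge : Prop := ∀ (strParam : String), Dom_StringChallenge strParam → Spec_StringChallenge strParam (StringChallenge strParam)

-- ===== LEMMAS AND PROOFS =====
-- canonical form of B's stack: it is always homogeneous, replicate |balance| of one kind
def pvCanon (b : Int) : List Bool :=
  if 0 ≤ b then List.replicate b.toNat true else List.replicate (-b).toNat false

-- the signed balance (#'x' minus #non-'x') of a character list
def pvBal : List Char → Int
  | [] => 0
  | c :: t => (if c == 'x' then 1 else -1) + pvBal t

theorem pv_canon_neg (b : Int) (hb : b < 0) : pvCanon b = false :: pvCanon (b + 1) := by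
  unfold pvCanon
  rw [if_neg (by omega)]
  by_cases h : b + 1 = 0
  · rw [if_pos (by omega)]
    have h1 : (-b).toNat = 1 := by omega
    have h2 : (b + 1).toNat = 0 := by omega
    simp [h1, h2]
  · rw [if_neg (by omega)]
    have h2 : (-b).toNat = (-(b + 1)).toNat + 1 := by omega
    rw [h2, List.replicate_succ]

theorem pv_canon_pos (b : Int) (hb : 0 < b) : pvCanon b = true :: pvCanon (b - 1) := by
  unfold pvCanon
  rw [if_pos (by omega), if_pos (by omega)]
  have h2 : b.toNat = (b - 1).toNat + 1 := by omega
  rw [h2, List.replicate_succ]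

theorem pv_step_canon (b : Int) (c : Char) :
    pvStep (pvCanon b) c = pvCanon (b + if c == 'x' then 1 else -1) := by
  rcases lt_trichotomy b 0 with hb | hb | hb
  · rw [pv_canon_neg b hb]
    by_cases hk : c == 'x'
    · simp [pvStep, hk]
    · simp only [pvStep, hk, if_false, Bool.false_eq_true]
      rw [pv_canon_neg (b + -1) (by omega), show b + -1 + 1 = b from by ring,
        pv_canon_neg b hb]
      simp
  · subst hb
    have h0 : pvCanon 0 = [] := by simp [pvCanon]
    rw [h0]
    by_cases hk : c == 'x'
    · simp only [pvStep, hk, if_true]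
      rw [pv_canon_pos (0 + 1) (by omega)]
      simp [h0]
    · simp only [pvStep, hk]
      norm_num [pvCanon]
  · rw [pv_canon_pos b hb]
    by_cases hk : c == 'x'
    · simp only [pvStep, hk, if_true]
      rw [pv_canon_pos (b + 1) (by omega), show b + 1 - 1 = b from by ring,
        pv_canon_pos b hb]
      simp
    · simp [pvStep, hk, show b + -1 = b - 1 from by ring]

theorem pv_fold_canon (l : List Char) (b : Int) :
    l.foldl pvStep (pvCanon b) = pvCanon (b + pvBal l) := by
  induction l generalizing b with
  | nil => simp [pvBal]
  | cons c t ih =>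
    simp only [List.foldl_cons, pv_step_canon, ih, pvBal]
    congr 1; ring

theorem pv_bal_count (l : List Char) :
    pvBal l = 2 * (l.count 'x' : Int) - l.length := by
  induction l with
  | nil => simp [pvBal]
  | cons c t ih =>
    by_cases hc : c = 'x' <;> simp [pvBal, hc, ih] <;> ring

-- A's loop computes the count of 'x' and the count of the remaining characters
theorem pv_loop (l : List Char) (x o : Int) :
    l.foldl (fun (p : Int × Int) i => if i == 'x' then (p.1 + 1, p.2) else (p.1, p.2 + 1)) (x, o)
      = (x + (l.count 'x' : Int), o + ((l.length : Int) - (l.count 'x' : Int))) := by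
  induction l generalizing x o with
  | nil => simp
  | cons c t ih =>
    simp only [List.foldl_cons]
    by_cases h : c = 'x'
    · rw [if_pos (by simp [h]), ih]
      simp [h, Prod.ext_iff]; ring
    · rw [if_neg (by simp [h]), ih]
      simp [h, Prod.ext_iff]; ring

theorem pvCanon_isEmpty (b : Int) : (pvCanon b).isEmpty = decide (b = 0) := by
  unfold pvCanon; split_ifs <;> simp <;> omega

-- ===== VERDICT (by name: the statement is the Claim_ definition above) =====
theorem StringChallenge_spec : Claim_equal_StringChallenge := by
  intro s _
  unfold Spec_StringChallenge StringChallenge StringChallenge_alt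
  rw [show ([] : List Bool) = pvCanon 0 by simp [pvCanon], pv_fold_canon, pv_bal_count, pv_loop,
    pvCanon_isEmpty]
  by_cases h : (0:Int) + (2 * (s.toList.count 'x' : Int) - s.toList.length) = 0
  · have h2 : (0:Int) + (s.toList.count 'x' : Int)
        = 0 + ((s.toList.length : Int) - s.toList.count 'x') := by omega
    have h3 : (0:Int) + (2 * (s.toList.count 'x' : Int) - s.length) = 0 := by
      rw [← String.length_toList]; omega
    simp [h2, h3]
  · simp
    rw [← String.length_toList]
    omega
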